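-- pv_equiv track=rewrite | github.com/BobettiFP/mdp | rl_tests/strategic_complexity_pipeline.py | _slots_to_action
-- ===== SOURCE A (Python) =====
-- from typing import Dict, List, Tuple, Set, Optional, Union
--
-- def _slots_to_action(slots: Set[str]) -> str:
--     """슬롯 집합을 행동으로 변환"""
--     if not slots:
--         return "EMPTY"
--
--     # 슬롯 조합을 행동 타입으로 분류
--     slot_categories = {
--         'info_seeking': {'name', 'address', 'phone', 'postcode', 'reference'},
--         'preference': {'food', 'area', 'pricerange', 'type', 'cuisine'},
--         'booking': {'day', 'time', 'people', 'stay', 'book'},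
--         'navigation': {'departure', 'destination', 'leaveat', 'arriveby', 'duration'}
--     }
--
--     action_components = []
--     for category, category_slots in slot_categories.items():
--         if slots & category_slots:  # 교집합이 있으면
--             action_components.append(category)
--
--     if not action_components:
--         action_components = ['general']
--
--     return "+".join(sorted(action_components))
-- ===== SOURCE B (Python) =====
-- def _slots_to_action(slots):
--     """슬롯 집합을 행동으로 변환 (flag-based single pass, no sort)"""
--     if not slots:
--         return "EMPTY"
--
--     info = pref = book = nav = False
--     for s in slots:
--         if s == 'name' or s == 'address' or s == 'phone' or s == 'postcode' or s == 'reference':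
--             info = True
--         elif s == 'food' or s == 'area' or s == 'pricerange' or s == 'type' or s == 'cuisine':
--             pref = True
--         elif s == 'day' or s == 'time' or s == 'people' or s == 'stay' or s == 'book':
--             book = True
--         elif s == 'departure' or s == 'destination' or s == 'leaveat' or s == 'arriveby' or s == 'duration':
--             nav = True
--
--     # emit categories directly in alphabetical order: booking < info_seeking < navigation < preference
--     parts = []
--     if book:
--         parts.append('booking')
--     if info:
--         parts.append('info_seeking')
--     if nav:
--         parts.append('navigation')
--     if pref:
--         parts.append('preference')
--     return "+".join(parts) if parts else "general"
-- ===== Notes on version B (the rewrite author's own statement) =====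
-- stated objective: alternative
-- what changed: Replaces A's dict-of-sets intersection scan plus sort+join with a single flag-accumulating pass over the slots (four booleans) that then emits the hit categories directly in their known alphabetical order, so no set intersection, no dict and no sorting is performed.
import Mathlib
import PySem

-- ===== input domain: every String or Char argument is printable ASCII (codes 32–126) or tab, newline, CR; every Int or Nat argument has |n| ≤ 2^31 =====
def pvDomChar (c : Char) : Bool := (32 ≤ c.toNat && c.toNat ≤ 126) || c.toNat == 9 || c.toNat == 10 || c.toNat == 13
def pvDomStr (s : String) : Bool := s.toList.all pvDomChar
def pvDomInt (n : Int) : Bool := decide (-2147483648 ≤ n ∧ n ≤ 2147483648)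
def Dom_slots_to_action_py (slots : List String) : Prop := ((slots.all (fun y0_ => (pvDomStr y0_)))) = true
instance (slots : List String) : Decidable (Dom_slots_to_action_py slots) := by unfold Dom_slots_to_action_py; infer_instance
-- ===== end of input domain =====

-- B replaces A's per-category set-intersection scan + sort + join with one flag-collecting
-- pass over the slots and a direct emission of the categories in alphabetical order (alternative).

-- ===== PORT A =====
-- A's category sets hold distinct string literals; they are ported as their element lists
-- (A only tests intersection-nonemptiness, which is order-independent).
def slots_to_action_py (slots : List String) : String :=
  if slots = [] then "EMPTY"
  else
    let slot_categories : List (String × List String) :=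
      [("info_seeking", ["name", "address", "phone", "postcode", "reference"]),
       ("preference", ["food", "area", "pricerange", "type", "cuisine"]),
       ("booking", ["day", "time", "people", "stay", "book"]),
       ("navigation", ["departure", "destination", "leaveat", "arriveby", "duration"])]
    -- 'slots & category_slots' nonempty ↔ some slot lies in the category set
    let action_components := slot_categories.foldl
      (fun acc p => if slots.any (fun s => p.2.contains s) then acc ++ [p.1] else acc) []
    let action_components := if action_components = [] then ["general"] else action_components
    PySem.Str.join "+" (PySem.List.sorted action_components (fun x => x))

-- ===== PORT B =====
-- the flag-collecting loop: (info, pref, book, nav)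
def pvCatLoop (fs : Bool × Bool × Bool × Bool) : List String → Bool × Bool × Bool × Bool
  | [] => fs
  | s :: rest =>
    pvCatLoop
      (if s == "name" || s == "address" || s == "phone" || s == "postcode" || s == "reference" then
        (true, fs.2.1, fs.2.2.1, fs.2.2.2)
      else if s == "food" || s == "area" || s == "pricerange" || s == "type" || s == "cuisine" then
        (fs.1, true, fs.2.2.1, fs.2.2.2)
      else if s == "day" || s == "time" || s == "people" || s == "stay" || s == "book" then
        (fs.1, fs.2.1, true, fs.2.2.2)
      else if s == "departure" || s == "destination" || s == "leaveat" || s == "arriveby" || s == "duration" then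
        (fs.1, fs.2.1, fs.2.2.1, true)
      else fs) rest

def slots_to_action_py_alt (slots : List String) : String :=
  match slots with
  | [] => "EMPTY"
  | _ =>
    let fs := pvCatLoop (false, false, false, false) slots
    -- categories emitted directly in alphabetical order: booking < info_seeking < navigation < preference
    let parts :=
      (if fs.2.2.1 then ["booking"] else []) ++ (if fs.1 then ["info_seeking"] else []) ++
      (if fs.2.2.2 then ["navigation"] else []) ++ (if fs.2.1 then ["preference"] else [])
    if parts = [] then "general" else PySem.Str.join "+" parts

-- ===== PRECONDITION & SPEC =====
def Spec_slots_to_action_py (slots : List String) (out : String) : Prop := out = slots_to_action_py_alt slots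
instance (slots : List String) (out : String) : Decidable (Spec_slots_to_action_py slots out) := by unfold Spec_slots_to_action_py; infer_instance

-- ===== CLAIM (what is proved, stated in full; the proofs are below) =====
def Claim_equal_slots_to_action_py : Prop := ∀ (slots : List String), Dom_slots_to_action_py slots → Spec_slots_to_action_py slots (slots_to_action_py slots)

-- ===== LEMMAS AND PROOFS =====

-- "some slot hits category i", as A computes it
def pvB1 (slots : List String) : Bool := slots.any (fun s => (["name", "address", "phone", "postcode", "reference"] : List String).contains s)
def pvB2 (slots : List String) : Bool := slots.any (fun s => (["food", "area", "pricerange", "type", "cuisine"] : List String).contains s)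
def pvB3 (slots : List String) : Bool := slots.any (fun s => (["day", "time", "people", "stay", "book"] : List String).contains s)
def pvB4 (slots : List String) : Bool := slots.any (fun s => (["departure", "destination", "leaveat", "arriveby", "duration"] : List String).contains s)

-- A's components list, as a function of the four hit booleans
def pvCompsA (b1 b2 b3 b4 : Bool) : List String :=
  (if b1 then ["info_seeking"] else []) ++ (if b2 then ["preference"] else []) ++
  (if b3 then ["booking"] else []) ++ (if b4 then ["navigation"] else [])

-- the same categories in the alphabetical (sorted) order
def pvL (b1 b2 b3 b4 : Bool) : List String :=
  (if b3 then ["booking"] else []) ++ (if b1 then ["info_seeking"] else []) ++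
  (if b4 then ["navigation"] else []) ++ (if b2 then ["preference"] else [])

-- the ==-chains of B agree with the list-membership tests of A
lemma pvChain1 (s : String) :
    (s == "name" || s == "address" || s == "phone" || s == "postcode" || s == "reference") =
      (["name", "address", "phone", "postcode", "reference"] : List String).contains s := by
  simp only [List.contains_cons, List.contains_nil, Bool.or_false, Bool.or_assoc]
lemma pvChain2 (s : String) :
    (s == "food" || s == "area" || s == "pricerange" || s == "type" || s == "cuisine") =
      (["food", "area", "pricerange", "type", "cuisine"] : List String).contains s := by
  simp only [List.contains_cons, List.contains_nil, Bool.or_false, Bool.or_assoc]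
lemma pvChain3 (s : String) :
    (s == "day" || s == "time" || s == "people" || s == "stay" || s == "book") =
      (["day", "time", "people", "stay", "book"] : List String).contains s := by
  simp only [List.contains_cons, List.contains_nil, Bool.or_false, Bool.or_assoc]
lemma pvChain4 (s : String) :
    (s == "departure" || s == "destination" || s == "leaveat" || s == "arriveby" || s == "duration") =
      (["departure", "destination", "leaveat", "arriveby", "duration"] : List String).contains s := by
  simp only [List.contains_cons, List.contains_nil, Bool.or_false, Bool.or_assoc]

-- the four category sets are pairwise disjoint
lemma pvDisj12 (s : String) (h : (["name", "address", "phone", "postcode", "reference"] : List String).contains s = true) :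
    (["food", "area", "pricerange", "type", "cuisine"] : List String).contains s = false := by
  have := List.mem_of_elem_eq_true h; fin_cases this <;> decide
lemma pvDisj13 (s : String) (h : (["name", "address", "phone", "postcode", "reference"] : List String).contains s = true) :
    (["day", "time", "people", "stay", "book"] : List String).contains s = false := by
  have := List.mem_of_elem_eq_true h; fin_cases this <;> decide
lemma pvDisj14 (s : String) (h : (["name", "address", "phone", "postcode", "reference"] : List String).contains s = true) :
    (["departure", "destination", "leaveat", "arriveby", "duration"] : List String).contains s = false := by
  have := List.mem_of_elem_eq_true h; fin_cases this <;> decide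
lemma pvDisj23 (s : String) (h : (["food", "area", "pricerange", "type", "cuisine"] : List String).contains s = true) :
    (["day", "time", "people", "stay", "book"] : List String).contains s = false := by
  have := List.mem_of_elem_eq_true h; fin_cases this <;> decide
lemma pvDisj24 (s : String) (h : (["food", "area", "pricerange", "type", "cuisine"] : List String).contains s = true) :
    (["departure", "destination", "leaveat", "arriveby", "duration"] : List String).contains s = false := by
  have := List.mem_of_elem_eq_true h; fin_cases this <;> decide
lemma pvDisj34 (s : String) (h : (["day", "time", "people", "stay", "book"] : List String).contains s = true) :
    (["departure", "destination", "leaveat", "arriveby", "duration"] : List String).contains s = false := by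
  have := List.mem_of_elem_eq_true h; fin_cases this <;> decide

-- the loop computes exactly the four "hit" booleans, or-ed onto the accumulator
lemma pvCatLoop_eq (l : List String) (fs : Bool × Bool × Bool × Bool) :
    pvCatLoop fs l = (fs.1 || pvB1 l, fs.2.1 || pvB2 l, fs.2.2.1 || pvB3 l, fs.2.2.2 || pvB4 l) := by
  induction l generalizing fs with
  | nil => simp [pvCatLoop, pvB1, pvB2, pvB3, pvB4]
  | cons x rest ih =>
    simp only [pvCatLoop, pvChain1, pvChain2, pvChain3, pvChain4, ih]
    cases h1 : (["name", "address", "phone", "postcode", "reference"] : List String).contains x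
    case true =>
      simp only [pvB1, pvB2, pvB3, pvB4, List.any_cons, h1, pvDisj12 x h1, pvDisj13 x h1,
        pvDisj14 x h1, Bool.false_eq_true, if_false, reduceIte, Bool.true_or, Bool.or_true, Bool.false_or]
    case false =>
      cases h2 : (["food", "area", "pricerange", "type", "cuisine"] : List String).contains x
      case true =>
        simp only [pvB1, pvB2, pvB3, pvB4, List.any_cons, h1, h2, pvDisj23 x h2, pvDisj24 x h2,
          Bool.false_eq_true, if_false, reduceIte, Bool.true_or, Bool.or_true, Bool.false_or]
      case false =>
        cases h3 : (["day", "time", "people", "stay", "book"] : List String).contains x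
        case true =>
          simp only [pvB1, pvB2, pvB3, pvB4, List.any_cons, h1, h2, h3, pvDisj34 x h3,
            Bool.false_eq_true, if_false, reduceIte, Bool.true_or, Bool.or_true, Bool.false_or]
        case false =>
          cases h4 : (["departure", "destination", "leaveat", "arriveby", "duration"] : List String).contains x <;>
            simp only [pvB1, pvB2, pvB3, pvB4, List.any_cons, h1, h2, h3, h4,
              Bool.false_eq_true, if_false, reduceIte, Bool.true_or, Bool.or_true, Bool.false_or]

-- name the sorted order: any strictly increasing rearrangement is sorted(xs)
lemma pvSorted_lit (xs ys : List String) (hp : ys.Perm xs)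
    (hs : List.Pairwise (fun a b : String => a.toList < b.toList) ys) :
    PySem.List.sorted xs (fun x => x) = ys :=
  PySem.List.sorted_eq_of_perm_of_pairwise_lt xs ys (fun x => x) hp
    (hs.imp fun h => String.lt_iff_toList_lt.mpr h)

lemma A_eq (slots : List String) (hnil : ¬ slots = []) :
    slots_to_action_py slots =
      PySem.Str.join "+" (PySem.List.sorted
        (if pvCompsA (pvB1 slots) (pvB2 slots) (pvB3 slots) (pvB4 slots) = [] then ["general"]
         else pvCompsA (pvB1 slots) (pvB2 slots) (pvB3 slots) (pvB4 slots)) (fun x => x)) := by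
  unfold slots_to_action_py
  rw [if_neg hnil]
  cases h1 : pvB1 slots <;> cases h2 : pvB2 slots <;> cases h3 : pvB3 slots <;> cases h4 : pvB4 slots <;>
    · simp only [pvB1] at h1; simp only [pvB2] at h2; simp only [pvB3] at h3; simp only [pvB4] at h4
      simp only [List.foldl, h1, h2, h3, h4]
      simp [pvCompsA]

lemma pvFinal : ∀ b1 b2 b3 b4 : Bool,
    PySem.Str.join "+" (PySem.List.sorted
        (if pvCompsA b1 b2 b3 b4 = [] then ["general"] else pvCompsA b1 b2 b3 b4) (fun x => x)) =
      if pvL b1 b2 b3 b4 = [] then "general"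
      else PySem.Str.join "+" (pvL b1 b2 b3 b4) := by
  intro b1 b2 b3 b4
  cases b1 <;> cases b2 <;> cases b3 <;> cases b4 <;>
    · simp only [pvCompsA, pvL]
      norm_num
      first
        | rfl
        | (rw [if_neg (by decide)]; congr 1; exact pvSorted_lit _ _ (by decide) (by decide))

-- ===== VERDICT (by name: the statement is the Claim_ definition above) =====
theorem slots_to_action_py_spec : Claim_equal_slots_to_action_py := by
  intro slots _
  unfold Spec_slots_to_action_py
  cases slots with
  | nil => rfl
  | cons x xs =>
    rw [A_eq (x :: xs) (by simp), pvFinal]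
    simp only [slots_to_action_py_alt, pvCatLoop_eq, Bool.false_or]
    rfl
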